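-- pv_equiv track=rewrite | github.com/alexandraback/datacollection | solutions_5639104758808576_1/Python/oonishi/a.py | solve
-- ===== SOURCE A (Python) =====
-- def solve(S):
-- 	stood = S[0]
--
-- 	res = 0
-- 	for need,cnt in enumerate(S[1:], 1):
-- 		if need > stood:
-- 			add = need - stood
-- 			stood += add
-- 			res += add
-- 		stood += cnt
-- 	return res
-- ===== SOURCE B (Python) =====
-- def solve(S):
--     d = 0
--     for x in reversed(S[:-1]):
--         d = max(0, 1 - x + d)
--     return d
-- ===== Notes on version B (the rewrite author's own statement) =====
-- stated objective: simpler
-- what changed: B discards A's forward simulation of a conditionally-bumped threshold with two accumulators and instead does a Kadane-style backward fold d = max(0, 1 - x + d) over S[:-1] in reverse: no prefix sum, no branch, one accumulator, opposite traversal direction.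
import Mathlib
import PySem

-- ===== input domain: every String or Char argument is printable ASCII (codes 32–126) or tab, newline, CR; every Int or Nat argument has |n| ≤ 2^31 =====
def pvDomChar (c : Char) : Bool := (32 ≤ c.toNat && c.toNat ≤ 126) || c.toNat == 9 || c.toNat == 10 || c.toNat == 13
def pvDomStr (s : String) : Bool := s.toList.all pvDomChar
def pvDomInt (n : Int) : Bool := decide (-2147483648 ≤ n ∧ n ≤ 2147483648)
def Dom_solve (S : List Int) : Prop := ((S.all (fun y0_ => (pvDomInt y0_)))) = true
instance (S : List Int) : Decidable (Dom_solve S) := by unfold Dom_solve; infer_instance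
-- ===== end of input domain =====

-- ===== PORT A =====
-- B replaces A's forward simulation (bumped threshold + addition counter) with a
-- backward Kadane-style fold over S[:-1]; objective: simpler (one accumulator, no branch).
def stepA (st : Int × Int) (p : Int × Nat) : Int × Int :=
  -- one iteration of A's loop: p = (cnt, need); bump stood to need if need > stood, then add cnt
  if (p.2 : Int) > st.1 then ((p.2 : Int) + p.1, st.2 + ((p.2 : Int) - st.1))
  else (st.1 + p.1, st.2)

def solve (S : List Int) : Int :=
  match S with
  | [] => 0   -- unreachable under Pre_solve: Python A raises IndexError on []
  | s0 :: rest => ((rest.zipIdx 1).foldl stepA (s0, 0)).2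

-- ===== PORT B =====
def solve_alt (S : List Int) : Int :=
  (S.dropLast.reverse).foldl (fun d x => max 0 (1 - x + d)) 0

-- ===== PRECONDITION & SPEC =====
-- Pre_ excludes the empty list, on which A (S[0]) raises IndexError.
def Pre_solve (S : List Int) : Prop := S ≠ []
instance (S : List Int) : Decidable (Pre_solve S) := by unfold Pre_solve; infer_instance
def pvWitness_solve : List Int := [1, 0, 2]

def Spec_solve (S : List Int) (out : Int) : Prop := out = solve_alt S
instance (S : List Int) (out : Int) : Decidable (Spec_solve S out) := by unfold Spec_solve; infer_instance

-- ===== CLAIM (what is proved, stated in full; the proofs are below) =====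
def Claim_equal_solve : Prop := ∀ (S : List Int), Dom_solve S → Pre_solve S → Spec_solve S (solve S)

-- ===== LEMMAS AND PROOFS =====
-- proof-only intermediate fold: running max of deficits (k - prefix)
def stepM (st : Int × Int) (p : Int × Nat) : Int × Int :=
  (st.1 + p.1, max st.2 ((p.2 : Int) - st.1))

-- B's fold, read as a foldr over S.dropLast
def F (l : List Int) : Int := l.foldr (fun x d => max 0 (1 - x + d)) 0

theorem solve_alt_eq_F (S : List Int) : solve_alt S = F S.dropLast := by
  simp [solve_alt, F, List.foldl_reverse]

-- Invariant linking A's state (pfx + res, res) with the max-of-deficits state (pfx, res).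
theorem keyA (l : List Int) (k : Nat) (pfx res : Int) :
    ((l.zipIdx k).foldl stepA (pfx + res, res)).2
      = ((l.zipIdx k).foldl stepM (pfx, res)).2 := by
  induction l generalizing k pfx res with
  | nil => rfl
  | cons a l ih =>
    rw [List.zipIdx_cons, List.foldl_cons, List.foldl_cons]
    by_cases h : (k : Int) > pfx + res
    · have h1 : stepA (pfx + res, res) (a, k) = ((pfx + a) + ((k : Int) - pfx), (k : Int) - pfx) := by
        simp only [stepA, if_pos h]
        exact Prod.ext (by omega) (by omega)
      have h2 : stepM (pfx, res) (a, k) = (pfx + a, (k : Int) - pfx) := by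
        simp only [stepM]
        exact Prod.ext rfl (by omega)
      rw [h1, h2, ih]
    · have h1 : stepA (pfx + res, res) (a, k) = ((pfx + a) + res, res) := by
        simp only [stepA, if_neg h]
        exact Prod.ext (by omega) rfl
      have h2 : stepM (pfx, res) (a, k) = (pfx + a, res) := by
        simp only [stepM]
        exact Prod.ext rfl (by omega)
      rw [h1, h2, ih]

-- The max-of-deficits fold equals res ⊔ ((k - pfx) + the backward Kadane value of l.dropLast).
theorem keyM (l : List Int) (hl : l ≠ []) : ∀ (k : Nat) (pfx res : Int),
    ((l.zipIdx k).foldl stepM (pfx, res)).2 = max res (((k : Int) - pfx) + F l.dropLast) := by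
  induction l with
  | nil => exact absurd rfl hl
  | cons a l ih =>
    intro k pfx res
    rw [List.zipIdx_cons, List.foldl_cons]
    match l, ih with
    | [], _ => simp [stepM, F]
    | b :: l', ih =>
      have hstep : stepM (pfx, res) (a, k) = (pfx + a, max res ((k : Int) - pfx)) := rfl
      rw [hstep, ih (by simp) (k + 1) (pfx + a) (max res ((k : Int) - pfx))]
      have hdl : (a :: b :: l').dropLast = a :: (b :: l').dropLast := rfl
      rw [hdl]
      show _ = max res (((k : Int) - pfx) + max 0 (1 - a + F (b :: l').dropLast))
      push_cast
      omega

-- ===== VERDICT (by name: the statement is the Claim_ definition above) =====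
theorem solve_spec : Claim_equal_solve := by
  intro S _ hpre
  unfold Spec_solve
  rw [solve_alt_eq_F]
  match S with
  | [] => exact absurd rfl hpre
  | s0 :: rest =>
    show ((rest.zipIdx 1).foldl stepA (s0, 0)).2 = F (s0 :: rest).dropLast
    have hA : ((rest.zipIdx 1).foldl stepA (s0, 0)).2
        = ((rest.zipIdx 1).foldl stepM (s0, 0)).2 := by
      simpa using keyA rest 1 s0 0
    rw [hA]
    match rest with
    | [] => simp [F]
    | b :: rest' =>
      rw [keyM (b :: rest') (by simp) 1 s0 0]
      show _ = F (s0 :: (b :: rest').dropLast)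
      show _ = max 0 (1 - s0 + F (b :: rest').dropLast)
      omega
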